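-- pv_equiv track=rewrite | github.com/m0x1mka/python_for_senior | Lesson_6/Part_5/6_5_24.py | best_sender
-- ===== SOURCE A (Python) =====
-- from collections import defaultdict
--
-- def best_sender(messages, senders):
--     words = defaultdict(int)
--     for i in zip(messages, senders):
--         words[i[1]] += len(i[0].split())
--     ans = defaultdict(list)
--     for key, value in words.items():
--         ans[value].append(key)
--
--     return sorted(ans[max(ans.keys())])[-1]
-- ===== SOURCE B (Python) =====
-- def best_sender(messages, senders):
--     words = {}
--     for msg, snd in zip(messages, senders):
--         words[snd] = words.get(snd, 0) + len(msg.split())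
--     return max(words, key=lambda s: (words[s], s))
-- ===== Notes on version B (the rewrite author's own statement) =====
-- stated objective: simpler
-- what changed: Keeps the per-sender word-count accumulation but replaces A's count->senders inverted index plus sorted(bucket)[-1] with a single composite-key max over the dict (count, then sender name), selecting the winner in one scan.
import Mathlib
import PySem

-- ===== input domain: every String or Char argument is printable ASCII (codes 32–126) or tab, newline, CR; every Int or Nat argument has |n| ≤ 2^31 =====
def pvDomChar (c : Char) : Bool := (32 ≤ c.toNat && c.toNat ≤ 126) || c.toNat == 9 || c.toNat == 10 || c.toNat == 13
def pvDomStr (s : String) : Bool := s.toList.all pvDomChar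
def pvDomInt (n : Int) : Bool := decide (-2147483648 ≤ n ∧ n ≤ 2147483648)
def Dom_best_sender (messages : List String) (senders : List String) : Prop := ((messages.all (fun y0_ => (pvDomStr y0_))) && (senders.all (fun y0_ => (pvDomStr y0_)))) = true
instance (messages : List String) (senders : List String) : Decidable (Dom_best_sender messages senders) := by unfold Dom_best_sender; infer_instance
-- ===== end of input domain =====

-- B replaces A's count→senders inverted index plus sorted(bucket)[-1] with a single
-- composite-key max (count, then sender name) over the word-count dict: simpler, one scan.

-- ===== PORT A =====
-- words = defaultdict(int); for i in zip(messages, senders): words[i[1]] += len(i[0].split())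
def pvWordsA (messages : List String) (senders : List String) : PySem.Dict String Int :=
  (messages.zip senders).foldl
    (fun d i => d.modify i.2 0 (fun v => v + ((PySem.Str.split₀ i.1).length : Int)))
    PySem.Dict.empty

-- ans = defaultdict(list); for key, value in words.items(): ans[value].append(key)
def pvAnsA (w : PySem.Dict String Int) : PySem.Dict Int (List String) :=
  w.items.foldl (fun d kv => d.modify kv.2 [] (fun t => t ++ [kv.1])) PySem.Dict.empty

-- return sorted(ans[max(ans.keys())])[-1]
def best_sender (messages : List String) (senders : List String) : String :=
  match PySem.List.max? (pvAnsA (pvWordsA messages senders)).keys (fun x => x) with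
  | none => ""   -- Python: max() of an empty sequence raises ValueError; excluded by Pre_
  | some m =>
      PySem.List.pyGetD
        (PySem.List.sorted ((pvAnsA (pvWordsA messages senders)).getD m []) (fun x => x) false)
        (-1) ""   -- [-1] on the (under Pre_ non-empty) sorted bucket

-- ===== PORT B =====
-- words = {}; for msg, snd in zip(messages, senders): words[snd] = words.get(snd, 0) + len(msg.split())
def pvWordsB (messages : List String) (senders : List String) : PySem.Dict String Int :=
  (messages.zip senders).foldl
    (fun d p => d.insert p.2 (d.getD p.2 0 + ((PySem.Str.split₀ p.1).length : Int)))
    PySem.Dict.empty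

-- return max(words, key=lambda s: (words[s], s))  — words[s] with s a key of words never
-- fails, ported as getD _ 0; max on the empty dict raises ValueError (excluded by Pre_).
def best_sender_alt (messages : List String) (senders : List String) : String :=
  (PySem.List.max2? (pvWordsB messages senders).keys
      (fun s => (pvWordsB messages senders).getD s 0) (fun s => s)).getD ""

-- ===== PRECONDITION & SPEC =====
-- Pre_ excludes exactly the inputs with an empty zip(messages, senders): there BOTH programs
-- raise ValueError (max() of an empty sequence).
def Pre_best_sender (messages : List String) (senders : List String) : Prop :=
  messages ≠ [] ∧ senders ≠ []
instance (messages : List String) (senders : List String) : Decidable (Pre_best_sender messages senders) := by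
  unfold Pre_best_sender; infer_instance
def pvWitness_best_sender : List String × List String := (["hi there", "ok go"], ["bob", "amy"])
def Spec_best_sender (messages : List String) (senders : List String) (out : String) : Prop :=
  out = best_sender_alt messages senders
instance (messages : List String) (senders : List String) (out : String) : Decidable (Spec_best_sender messages senders out) := by
  unfold Spec_best_sender; infer_instance

-- ===== CLAIM (what is proved, stated in full; the proofs are below) =====
def Claim_equal_best_sender : Prop := ∀ (messages : List String) (senders : List String), Dom_best_sender messages senders → Pre_best_sender messages senders → Spec_best_sender messages senders (best_sender messages senders)

-- ===== LEMMAS AND PROOFS =====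

-- the two accumulation loops build the same dict (Dict.modify k d0 f IS insert k (f (getD k d0)))
theorem wordsA_eq_wordsB (messages senders : List String) :
    pvWordsA messages senders = pvWordsB messages senders := rfl

-- lexicographic (count, name) order used by B's composite key
def LexLe {α : Type} (k1 : α → Int) (k2 : α → String) (a b : α) : Prop :=
  k1 a < k1 b ∨ (k1 a = k1 b ∧ k2 a ≤ k2 b)

theorem lexLe_refl {α : Type} (k1 : α → Int) (k2 : α → String) (a : α) : LexLe k1 k2 a a :=
  Or.inr ⟨rfl, le_refl _⟩

theorem lexLe_trans {α : Type} {k1 : α → Int} {k2 : α → String} {a b c : α}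
    (h1 : LexLe k1 k2 a b) (h2 : LexLe k1 k2 b c) : LexLe k1 k2 a c := by
  rcases h1 with h1 | ⟨h1, h1'⟩ <;> rcases h2 with h2 | ⟨h2, h2'⟩
  · exact Or.inl (lt_trans h1 h2)
  · exact Or.inl (h2 ▸ h1)
  · exact Or.inl (h1 ▸ h2)
  · exact Or.inr ⟨h1.trans h2, le_trans h1' h2'⟩

-- B's running fold keeps a lex-maximal element
theorem max2?_foldl_spec {α : Type} (k1 : α → Int) (k2 : α → String) :
    ∀ (xs : List α) (a m : α),
      xs.foldl
        (fun acc x => match acc with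
          | none => some x
          | some mm =>
            if (decide (k1 mm < k1 x) || !decide (k1 x < k1 mm) && decide (k2 mm < k2 x)) = true
            then some x else some mm)
        (some a) = some m →
      (m = a ∨ m ∈ xs) ∧ LexLe k1 k2 a m ∧ ∀ y ∈ xs, LexLe k1 k2 y m := by
  intro xs
  induction xs with
  | nil =>
      intro a m h
      simp only [List.foldl_nil, Option.some.injEq] at h
      subst h
      exact ⟨Or.inl rfl, lexLe_refl _ _ _, by simp⟩
  | cons x t ih =>
      intro a m h
      simp only [List.foldl_cons] at h
      by_cases hc : (decide (k1 a < k1 x) || !decide (k1 x < k1 a) && decide (k2 a < k2 x)) = true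
      · rw [if_pos hc] at h
        obtain ⟨hmem, hle, hall⟩ := ih x m h
        have hax : LexLe k1 k2 a x := by
          simp only [Bool.or_eq_true, Bool.and_eq_true, Bool.not_eq_true', decide_eq_true_eq,
            decide_eq_false_iff_not] at hc
          rcases hc with hc | ⟨hc1, hc2⟩
          · exact Or.inl hc
          · rcases lt_or_eq_of_le (not_lt.mp hc1) with h' | h'
            · exact Or.inl h'
            · exact Or.inr ⟨h', le_of_lt hc2⟩
        refine ⟨?_, lexLe_trans hax hle, ?_⟩
        · rcases hmem with rfl | hmem
          · exact Or.inr List.mem_cons_self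
          · exact Or.inr (List.mem_cons_of_mem _ hmem)
        · intro y hy
          rcases List.mem_cons.mp hy with rfl | hy
          · exact hle
          · exact hall y hy
      · rw [if_neg hc] at h
        obtain ⟨hmem, hle, hall⟩ := ih a m h
        have hc1 : ¬ k1 a < k1 x := fun hlt => hc (by simp [hlt])
        have hxa : LexLe k1 k2 x a := by
          rcases lt_or_eq_of_le (not_lt.mp hc1) with h' | h'
          · exact Or.inl h'
          · refine Or.inr ⟨h', ?_⟩
            by_cases h2 : k2 a < k2 x
            · exact absurd (by simp [h', h2]) hc
            · exact not_lt.mp h2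
        refine ⟨?_, hle, ?_⟩
        · rcases hmem with rfl | hmem
          · exact Or.inl rfl
          · exact Or.inr (List.mem_cons_of_mem _ hmem)
        · intro y hy
          rcases List.mem_cons.mp hy with rfl | hy
          · exact lexLe_trans hxa hle
          · exact hall y hy

-- max2? of a non-empty list returns a lex-maximal member
theorem max2?_nonempty_spec {α : Type} (k1 : α → Int) (k2 : α → String) (xs : List α)
    (h : xs ≠ []) :
    ∃ m, PySem.List.max2? xs k1 k2 = some m ∧ m ∈ xs ∧ ∀ y ∈ xs, LexLe k1 k2 y m := by
  cases xs with
  | nil => exact absurd rfl h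
  | cons x t =>
      have hsome : ∀ (u : List α) (a : α), ∃ m, u.foldl
          (fun acc x => match acc with
            | none => some x
            | some mm =>
              if (decide (k1 mm < k1 x) || !decide (k1 x < k1 mm) && decide (k2 mm < k2 x)) = true
              then some x else some mm)
          (some a) = some m := by
        intro u
        induction u with
        | nil => intro a; exact ⟨a, rfl⟩
        | cons y v ih =>
            intro a
            simp only [List.foldl_cons]
            by_cases hc : (decide (k1 a < k1 y) || !decide (k1 y < k1 a) && decide (k2 a < k2 y)) = true
            · rw [if_pos hc]; exact ih y
            · rw [if_neg hc]; exact ih a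
      obtain ⟨m, hm⟩ := hsome t x
      have hspec := max2?_foldl_spec k1 k2 t x m hm
      refine ⟨m, ?_, ?_, ?_⟩
      · simpa only [PySem.List.max2?, List.foldl_cons] using hm
      · rcases hspec.1 with rfl | hmem
        · exact List.mem_cons_self
        · exact List.mem_cons_of_mem _ hmem
      · intro y hy
        rcases List.mem_cons.mp hy with rfl | hy
        · exact hspec.2.1
        · exact hspec.2.2 y hy

-- grouping fold: the bucket of value v collects, in order, the first components with second = v
theorem group_getD (l : List (String × Int)) (d : PySem.Dict Int (List String)) (v : Int) :
    (l.foldl (fun d kv => d.modify kv.2 [] (fun t => t ++ [kv.1])) d).getD v []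
      = d.getD v [] ++ (l.filter (fun kv => decide (kv.2 = v))).map (·.1) := by
  induction l generalizing d with
  | nil => simp
  | cons kv t ih =>
      simp only [List.foldl_cons, ih, List.filter_cons]
      by_cases hv : kv.2 = v
      · subst hv
        rw [PySem.Dict.getD_modify_self]
        simp [List.append_assoc]
      · rw [PySem.Dict.getD_modify_of_ne _ _ _ (fun h => hv h.symm)]
        simp [hv]

-- grouping fold: key membership = occurrence among the second components
theorem group_keys_mem (l : List (String × Int)) (d : PySem.Dict Int (List String)) (v : Int) :
    v ∈ (l.foldl (fun d kv => d.modify kv.2 [] (fun t => t ++ [kv.1])) d).keys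
      ↔ v ∈ d.keys ∨ v ∈ l.map (·.2) := by
  induction l generalizing d with
  | nil => simp
  | cons kv t ih =>
      simp only [List.foldl_cons]
      rw [ih]
      simp only [PySem.Dict.keys_modify, PySem.Dict.mem_keys_insert, List.map_cons, List.mem_cons]
      tauto

-- counting fold: key membership = occurrence among the senders
theorem wordsB_aux_mem (l : List (String × String)) (d : PySem.Dict String Int) (s : String) :
    s ∈ (l.foldl (fun d p => d.insert p.2 (d.getD p.2 0 + ((PySem.Str.split₀ p.1).length : Int))) d).keys
      ↔ s ∈ d.keys ∨ s ∈ l.map (·.2) := by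
  induction l generalizing d with
  | nil => simp
  | cons p t ih =>
      simp only [List.foldl_cons]
      rw [ih]
      simp only [PySem.Dict.mem_keys_insert, List.map_cons, List.mem_cons]
      tauto

theorem wordsB_keys_mem (messages senders : List String) (s : String) :
    s ∈ (pvWordsB messages senders).keys ↔ s ∈ (messages.zip senders).map (·.2) := by
  unfold pvWordsB
  rw [wordsB_aux_mem]
  simp [PySem.Dict.keys_empty]

theorem wordsB_keys_nodup (messages senders : List String) :
    (pvWordsB messages senders).keys.Nodup := by
  unfold pvWordsB
  exact PySem.Dict.nodup_keys_foldl_insert_key (messages.zip senders) (fun p => p.2)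
    (fun d p => d.getD p.2 0 + ((PySem.Str.split₀ p.1).length : Int)) PySem.Dict.empty
    PySem.Dict.nodup_keys_empty

-- the last element of a ≤-sorted list bounds every element
theorem pairwise_le_getLast {l : List String} (hp : l.Pairwise (· ≤ ·)) (h : l ≠ []) :
    ∀ y ∈ l, y ≤ l.getLast h := by
  induction l with
  | nil => exact absurd rfl h
  | cons a t ih =>
      intro y hy
      cases t with
      | nil =>
          rcases List.mem_cons.mp hy with rfl | hy'
          · simp [List.getLast_singleton]
          · simp at hy'
      | cons b u =>
          rw [List.getLast_cons (by simp : (b :: u) ≠ [])]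
          rcases List.mem_cons.mp hy with rfl | hy'
          · exact (List.pairwise_cons.mp hp).1 _ (List.getLast_mem _)
          · exact ih (List.pairwise_cons.mp hp).2 (by simp) y hy'

-- ===== VERDICT (by name: the statement is the Claim_ definition above) =====
theorem best_sender_spec : Claim_equal_best_sender := by
  intro messages senders _hdom hpre
  obtain ⟨hm, hs⟩ := hpre
  unfold Spec_best_sender best_sender best_sender_alt
  rw [wordsA_eq_wordsB]
  -- a non-empty zip gives a key of the word-count dict
  obtain ⟨p0, hp0⟩ : ∃ p, p ∈ messages.zip senders := by
    cases hmm : messages with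
    | nil => exact absurd hmm hm
    | cons m0 mt =>
        cases hss : senders with
        | nil => exact absurd hss hs
        | cons s0 st => exact ⟨(m0, s0), by simp⟩
  have hkey0 : p0.2 ∈ (pvWordsB messages senders).keys :=
    (wordsB_keys_mem _ _ _).mpr (List.mem_map.mpr ⟨p0, hp0, rfl⟩)
  have hkeysne : (pvWordsB messages senders).keys ≠ [] := by
    intro hnil; rw [hnil] at hkey0; simp at hkey0
  have hnd := wordsB_keys_nodup messages senders
  have hitems : (pvWordsB messages senders).items
      = (pvWordsB messages senders).keys.map (fun k => (k, (pvWordsB messages senders).getD k 0)) :=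
    PySem.Dict.items_eq_map_keys _ hnd 0
  -- the buckets of A's inverted index
  have hbucket : ∀ v, (pvAnsA (pvWordsB messages senders)).getD v []
      = (pvWordsB messages senders).keys.filter
          (fun k => decide ((pvWordsB messages senders).getD k 0 = v)) := by
    intro v
    unfold pvAnsA
    rw [group_getD, hitems]
    simp [List.filter_map, List.map_map, Function.comp_def]
  have hak : ∀ v, v ∈ (pvAnsA (pvWordsB messages senders)).keys
      ↔ v ∈ (pvWordsB messages senders).keys.map
          (fun k => (pvWordsB messages senders).getD k 0) := by
    intro v
    unfold pvAnsA
    rw [group_keys_mem, hitems]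
    simp [List.map_map, Function.comp, PySem.Dict.keys_empty]
  -- B's composite-key max
  obtain ⟨b, hbeq, hbmem, hball⟩ :=
    max2?_nonempty_spec (fun s => (pvWordsB messages senders).getD s 0) (fun s => s)
      (pvWordsB messages senders).keys hkeysne
  rw [hbeq]
  -- A's max over the bucket values
  cases hmax : PySem.List.max? (pvAnsA (pvWordsB messages senders)).keys (fun x => x) with
  | none =>
      exfalso
      have hnilk := (PySem.List.max?_eq_none_iff _ _).mp hmax
      have h1 : (pvWordsB messages senders).getD p0.2 0
          ∈ (pvAnsA (pvWordsB messages senders)).keys :=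
        (hak _).mpr (List.mem_map.mpr ⟨p0.2, hkey0, rfl⟩)
      rw [hnilk] at h1; simp at h1
  | some m =>
      have hmmem : m ∈ (pvAnsA (pvWordsB messages senders)).keys := PySem.List.max?_mem hmax
      have hmax_all : ∀ v ∈ (pvAnsA (pvWordsB messages senders)).keys, v ≤ m :=
        fun v hv => PySem.List.max?_isMax hmax v hv
      obtain ⟨a0, ha0k, ha0v⟩ := List.mem_map.mp ((hak m).mp hmmem)
      show PySem.List.pyGetD (PySem.List.sorted ((pvAnsA (pvWordsB messages senders)).getD m [])
          (fun x => x) false) (-1) "" = (some b).getD ""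
      rw [hbucket m]
      have hbne : (pvWordsB messages senders).keys.filter
          (fun k => decide ((pvWordsB messages senders).getD k 0 = m)) ≠ [] := by
        have hmem : a0 ∈ (pvWordsB messages senders).keys.filter
            (fun k => decide ((pvWordsB messages senders).getD k 0 = m)) :=
          List.mem_filter.mpr ⟨ha0k, by simp [ha0v]⟩
        intro hnil; rw [hnil] at hmem; simp at hmem
      have hsne : PySem.List.sorted ((pvWordsB messages senders).keys.filter
          (fun k => decide ((pvWordsB messages senders).getD k 0 = m))) (fun x => x) false ≠ [] := by
        intro hnil
        exact hbne ((PySem.List.sorted_eq_nil_iff _ _ _).mp hnil)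
      rw [PySem.List.pyGetD_neg_one _ _ hsne]
      -- the last element of the sorted bucket
      have ha_bucket : (PySem.List.sorted _ (fun x => x) false).getLast hsne
          ∈ (pvWordsB messages senders).keys.filter
            (fun k => decide ((pvWordsB messages senders).getD k 0 = m)) :=
        ((PySem.List.sorted_perm _ (fun x => x) false).mem_iff).mp (List.getLast_mem hsne)
      obtain ⟨hak', hgam'⟩ := List.mem_filter.mp ha_bucket
      have hgam : (pvWordsB messages senders).getD
          ((PySem.List.sorted _ (fun x => x) false).getLast hsne) 0 = m := by
        simpa using hgam'
      have ha_max : ∀ y ∈ (pvWordsB messages senders).keys.filter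
          (fun k => decide ((pvWordsB messages senders).getD k 0 = m)),
          y ≤ (PySem.List.sorted _ (fun x => x) false).getLast hsne := fun y hy =>
        pairwise_le_getLast (PySem.List.sorted_pairwise _ (fun x => x)) hsne y
          (((PySem.List.sorted_perm _ (fun x => x) false).mem_iff).mpr hy)
      -- compare the two winners
      have hgb_le : (pvWordsB messages senders).getD b 0 ≤ m :=
        hmax_all _ ((hak _).mpr (List.mem_map.mpr ⟨b, hbmem, rfl⟩))
      have hlex := hball _ hak'
      rcases hlex with hlt | ⟨hgeq, hab⟩
      · exfalso
        have h1 : (pvWordsB messages senders).getD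
            ((PySem.List.sorted ((pvWordsB messages senders).keys.filter
              (fun k => decide ((pvWordsB messages senders).getD k 0 = m)))
              (fun x => x) false).getLast hsne) 0
            < (pvWordsB messages senders).getD b 0 := hlt
        rw [hgam] at h1
        exact absurd (lt_of_lt_of_le h1 hgb_le) (lt_irrefl m)
      · have hgeq' : (pvWordsB messages senders).getD
            ((PySem.List.sorted ((pvWordsB messages senders).keys.filter
              (fun k => decide ((pvWordsB messages senders).getD k 0 = m)))
              (fun x => x) false).getLast hsne) 0
            = (pvWordsB messages senders).getD b 0 := hgeq
        have hgbm : (pvWordsB messages senders).getD b 0 = m := by rw [← hgeq', hgam]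
        have hbbucket : b ∈ (pvWordsB messages senders).keys.filter
            (fun k => decide ((pvWordsB messages senders).getD k 0 = m)) :=
          List.mem_filter.mpr ⟨hbmem, by simp [hgbm]⟩
        have hba := ha_max b hbbucket
        simpa using le_antisymm hab hba
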